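-- pv_equiv track=rewrite | github.com/johnwasham/python-solutions | solutions/array_traversals/iterate_middle_to_end.py | iterate_middle_to_end
-- ===== SOURCE A (Python) =====
-- def iterate_middle_to_end(numbers):
--     mid = len(numbers) // 2  # Middle index if odd; right-middle index if even
--     if len(numbers) % 2 == 1:
--         left = mid - 1  # The left to the middle element
--         right = mid + 1  # The right to the middle element
--         new_order = [numbers[mid]]  # Adding the middle element to the resulting array
--     else:
--         left = mid - 1  # Left middle element
--         right = mid  # Right middle element
--         new_order = []  # No elements in the resulting array for now
--
--     while left >= 0 and right < len(numbers):
--         new_order.append(numbers[left])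
--         new_order.append(numbers[right])
--         left -= 1
--         right += 1
--
--     return new_order
-- ===== SOURCE B (Python) =====
-- def iterate_middle_to_end(numbers):
--     mid = len(numbers) // 2
--     left = numbers[:mid][::-1]
--     if len(numbers) % 2 == 1:
--         head = [numbers[mid]]
--         right = numbers[mid + 1:]
--     else:
--         head = []
--         right = numbers[mid:]
--     return head + [x for pair in zip(left, right) for x in pair]
-- ===== Notes on version B (the rewrite author's own statement) =====
-- stated objective: idiomatic
-- what changed: Replaces the two-pointer while loop that appends element by element with slicing: reverse the left half, take the right half, and zip-interleave them (prepending the middle element when the length is odd).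
import Mathlib
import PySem

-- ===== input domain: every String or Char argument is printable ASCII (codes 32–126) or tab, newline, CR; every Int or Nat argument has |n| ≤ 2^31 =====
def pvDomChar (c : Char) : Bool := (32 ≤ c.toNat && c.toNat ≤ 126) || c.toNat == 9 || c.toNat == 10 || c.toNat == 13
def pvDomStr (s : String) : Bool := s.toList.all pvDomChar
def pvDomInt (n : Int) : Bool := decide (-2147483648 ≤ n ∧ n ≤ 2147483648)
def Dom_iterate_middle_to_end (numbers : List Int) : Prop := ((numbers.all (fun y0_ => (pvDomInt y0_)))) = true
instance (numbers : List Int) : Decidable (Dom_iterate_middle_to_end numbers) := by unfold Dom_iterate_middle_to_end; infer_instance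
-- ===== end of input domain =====

-- B: slicing + zip-interleave instead of A's two-pointer expanding while loop; return values proved equal.
-- ===== PORT A =====
-- the while loop of A: appends numbers[left], numbers[right], moves the pointers outward
def iterA_loop (numbers : List Int) (left right : Int) (acc : List Int) : List Int :=
  if _h : left ≥ 0 ∧ right < (numbers.length : Int) then
    iterA_loop numbers (left - 1) (right + 1)
      (acc ++ [(PySem.List.pyGet? numbers left).getD 0, (PySem.List.pyGet? numbers right).getD 0])
  else acc
termination_by (left + 1).toNat
decreasing_by omega

def iterate_middle_to_end (numbers : List Int) : List Int :=
  let mid : Int := PySem.Int.floordiv (numbers.length : Int) 2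
  if (numbers.length : Int) % 2 == 1 then
    iterA_loop numbers (mid - 1) (mid + 1) [(PySem.List.pyGet? numbers mid).getD 0]
  else
    iterA_loop numbers (mid - 1) mid []

-- ===== PORT B =====
def iterate_middle_to_end_alt (numbers : List Int) : List Int :=
  let mid : Int := PySem.Int.floordiv (numbers.length : Int) 2
  let left := (PySem.List.slice numbers none (some mid)).reverse
  let hr :=
    if (numbers.length : Int) % 2 == 1 then
      ([(PySem.List.pyGet? numbers mid).getD 0], PySem.List.slice numbers (some (mid + 1)) none)
    else
      (([] : List Int), PySem.List.slice numbers (some mid) none)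
  hr.1 ++ (left.zip hr.2).flatMap (fun p => [p.1, p.2])

-- ===== PRECONDITION & SPEC =====
def Spec_iterate_middle_to_end (numbers : List Int) (out : List Int) : Prop := out = iterate_middle_to_end_alt numbers
instance (numbers : List Int) (out : List Int) : Decidable (Spec_iterate_middle_to_end numbers out) := by unfold Spec_iterate_middle_to_end; infer_instance

-- ===== CLAIM (what is proved, stated in full; the proofs are below) =====
def Claim_equal_iterate_middle_to_end : Prop := ∀ (numbers : List Int), Dom_iterate_middle_to_end numbers → Spec_iterate_middle_to_end numbers (iterate_middle_to_end numbers)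

-- ===== LEMMAS AND PROOFS =====

-- ===== VERDICT (by name: the statement is the Claim_ definition above) =====
-- key invariant: the loop produces the zip-interleave of the reversed prefix and the suffix
theorem iterA_loop_eq (numbers : List Int) (left right : Int) (acc : List Int)
    (hl : left < (numbers.length : Int)) (hr : 0 ≤ right) :
    iterA_loop numbers left right acc =
      acc ++ (((numbers.take (left + 1).toNat).reverse).zip (numbers.drop right.toNat)).flatMap
        (fun p => [p.1, p.2]) := by
  generalize hn : (left + 1).toNat = n
  induction n generalizing left right acc with
  | zero =>
    rw [iterA_loop, dif_neg (by omega)]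
    simp
  | succ n ih =>
    rw [iterA_loop]
    by_cases hL : 0 ≤ left
    · by_cases hR : right < (numbers.length : Int)
      · rw [dif_pos ⟨hL, hR⟩,
            ih (left - 1) (right + 1) _ (by omega) (by omega) (by omega)]
        obtain ⟨m, rfl⟩ : ∃ m : Nat, right = (m : Int) := ⟨right.toNat, by omega⟩
        obtain ⟨l0, rfl⟩ : ∃ l0 : Nat, left = (l0 : Int) := ⟨left.toNat, by omega⟩
        have hl0 : l0 = n := by omega
        subst hl0
        have hn' : l0 < numbers.length := by omega
        have hrt : m < numbers.length := by omega
        have em : ((m : Int) + 1).toNat = m + 1 := by omega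
        rw [em, List.take_add_one, PySem.List.pyGet?_natCast, PySem.List.pyGet?_natCast]
        simp only [Int.toNat_natCast]
        rw [List.drop_eq_getElem_cons hrt, List.getElem?_eq_getElem hn']
        simp only [Option.toList_some, List.reverse_append, List.reverse_singleton,
          List.singleton_append, List.zip_cons_cons, List.flatMap_cons]
        simp [List.append_assoc, List.getElem?_eq_getElem hrt]
      · rw [dif_neg (by omega)]
        have hd : numbers.drop right.toNat = [] := List.drop_eq_nil_of_le (by omega)
        simp [hd]
    · exact absurd hn (by omega)

theorem iterate_middle_to_end_spec : Claim_equal_iterate_middle_to_end := by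
  intro numbers _
  unfold Spec_iterate_middle_to_end iterate_middle_to_end iterate_middle_to_end_alt
  have hds : numbers.length / 2 ≤ numbers.length := Nat.div_le_self _ _
  have hmid : PySem.Int.floordiv (numbers.length : Int) 2 = ((numbers.length / 2 : Nat) : Int) := by
    exact_mod_cast PySem.Int.floordiv_natCast numbers.length 2
  simp only [hmid]
  by_cases hodd : ((numbers.length : Int) % 2 == 1) = true
  · simp only [hodd, if_pos]
    rw [iterA_loop_eq numbers _ _ _ (by push_cast; omega) (by positivity),
        PySem.List.slice_to_natCast]
    have e1 : (((numbers.length / 2 : Nat) : Int) - 1 + 1).toNat = numbers.length / 2 := by omega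
    have e3 : ((numbers.length / 2 : Nat) : Int) + 1 = ((numbers.length / 2 + 1 : Nat) : Int) := by
      push_cast; ring
    rw [e1, e3, PySem.List.slice_from_natCast]
    have e2 : (((numbers.length / 2 + 1 : Nat) : Int)).toNat = numbers.length / 2 + 1 := by omega
    rw [e2]
  · simp only [hodd, if_neg, Bool.false_eq_true, not_false_iff]
    rw [iterA_loop_eq numbers _ _ _ (by push_cast; omega) (by positivity),
        PySem.List.slice_to_natCast, PySem.List.slice_from_natCast]
    have e1 : (((numbers.length / 2 : Nat) : Int) - 1 + 1).toNat = numbers.length / 2 := by omega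
    have e2 : (((numbers.length / 2 : Nat) : Int)).toNat = numbers.length / 2 := by omega
    rw [e1, e2]
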